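-- pv_equiv track=rewrite | github.com/AppraiseDev/Appraise | Campaign/management/commands/InitCampaignFY1995.py | _create_uniform_task_map
-- ===== SOURCE A (Python) =====
-- def _create_uniform_task_map(annotators, tasks, redudancy):
--     """
--     Creates task maps, uniformly distributed across given annotators.
--     """
--     _total_tasks = tasks * redudancy
--     if annotators == 0 or _total_tasks % annotators > 0:
--         return None
--
--     _tasks_per_annotator = _total_tasks // annotators
--
--     _results = []
--     _current_task_id = 0
--     for _unused_annotator_id in range(annotators):
--         _annotator_tasks = []
--         for annotator_task in range(_tasks_per_annotator):
--             task_id = (_current_task_id + annotator_task) % tasks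
--             _annotator_tasks.append(task_id)
--             _current_task_id = task_id
--         _current_task_id += 1
--         _results.append(tuple(_annotator_tasks))
--
--     return _results
-- ===== SOURCE B (Python) =====
-- def _create_uniform_task_map(annotators, tasks, redudancy):
--     """
--     Creates task maps, uniformly distributed across given annotators.
--
--     Fully closed-form: there is no running accumulator at all.  The original
--     recurrence task_id = (prev + k) % tasks telescopes inside a row to
--     (start + k*(k+1)//2) % tasks, and across rows the start value advances by
--     step = (n-1)*n//2 + 1 modulo tasks, so row r, position k is simply
--     (r*step + k*(k+1)//2) % tasks.  (Whenever n > 0 we have tasks != 0, and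
--     modular congruence makes the carried value interchangeable with r*step.)
--     """
--     total = tasks * redudancy
--     if annotators == 0 or total % annotators > 0:
--         return None
--     n = total // annotators
--     step = (n - 1) * n // 2 + 1
--     return [tuple((r * step + k * (k + 1) // 2) % tasks for k in range(n))
--             for r in range(annotators)]
-- ===== Notes on version B (the rewrite author's own statement) =====
-- stated objective: alternative
-- what changed: A threads a running accumulator through nested loops (task_id = (prev + k) % tasks carried across rows via _current_task_id); B is stateless: it computes every entry by the closed form (r*step + k*(k+1)//2) % tasks with step = (n-1)*n//2 + 1, since the recurrence telescopes to triangular numbers within a row and the carry advances by step modulo tasks across rows.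
import Mathlib
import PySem

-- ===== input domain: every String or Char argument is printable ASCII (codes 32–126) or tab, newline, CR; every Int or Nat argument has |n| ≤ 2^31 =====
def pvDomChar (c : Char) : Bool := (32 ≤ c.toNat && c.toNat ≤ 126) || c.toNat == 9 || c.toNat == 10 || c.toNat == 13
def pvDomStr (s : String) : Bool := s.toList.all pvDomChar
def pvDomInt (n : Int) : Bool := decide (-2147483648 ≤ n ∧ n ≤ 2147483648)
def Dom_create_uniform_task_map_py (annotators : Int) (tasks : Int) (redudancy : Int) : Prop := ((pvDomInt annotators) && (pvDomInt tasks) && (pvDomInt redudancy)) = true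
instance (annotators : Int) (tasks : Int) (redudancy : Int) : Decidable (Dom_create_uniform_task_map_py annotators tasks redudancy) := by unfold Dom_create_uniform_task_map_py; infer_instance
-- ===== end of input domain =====

-- B replaces A's stateful nested loops (a running accumulator carried across rows) by the
-- stateless closed form (r*step + k*(k+1)//2) % tasks with step = (n-1)*n//2 + 1; objective: alternative.

-- ===== PORT A =====
def create_uniform_task_map_py (annotators : Int) (tasks : Int) (redudancy : Int) : Option (List (List Int)) :=
  let totalTasks := tasks * redudancy
  if annotators = 0 ∨ 0 < PySem.Int.mod totalTasks annotators then none
  else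
    let tasksPer := PySem.Int.floordiv totalTasks annotators
    let st := (PySem.List.pyRange 0 annotators 1).foldl
      (fun (st : List (List Int) × Int) _ =>
        let inner := (PySem.List.pyRange 0 tasksPer 1).foldl
          (fun (p : List Int × Int) k =>
            (p.1 ++ [PySem.Int.mod (p.2 + k) tasks], PySem.Int.mod (p.2 + k) tasks))
          ([], st.2)
        (st.1 ++ [inner.1], inner.2 + 1))
      ([], 0)
    some st.1

-- ===== PORT B =====
def create_uniform_task_map_py_alt (annotators : Int) (tasks : Int) (redudancy : Int) : Option (List (List Int)) :=
  let total := tasks * redudancy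
  if annotators = 0 ∨ 0 < PySem.Int.mod total annotators then none
  else
    let n := PySem.Int.floordiv total annotators
    let step := PySem.Int.floordiv ((n - 1) * n) 2 + 1
    some ((PySem.List.pyRange 0 annotators 1).map (fun r =>
      (PySem.List.pyRange 0 n 1).map (fun k =>
        PySem.Int.mod (r * step + PySem.Int.floordiv (k * (k + 1)) 2) tasks)))

-- ===== PRECONDITION & SPEC =====
def Spec_create_uniform_task_map_py (annotators : Int) (tasks : Int) (redudancy : Int) (out : Option (List (List Int))) : Prop := out = create_uniform_task_map_py_alt annotators tasks redudancy
instance (annotators : Int) (tasks : Int) (redudancy : Int) (out : Option (List (List Int))) : Decidable (Spec_create_uniform_task_map_py annotators tasks redudancy out) := by unfold Spec_create_uniform_task_map_py; infer_instance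

-- ===== CLAIM (what is proved, stated in full; the proofs are below) =====
def Claim_equal_create_uniform_task_map_py : Prop := ∀ (annotators : Int) (tasks : Int) (redudancy : Int), Dom_create_uniform_task_map_py annotators tasks redudancy → Spec_create_uniform_task_map_py annotators tasks redudancy (create_uniform_task_map_py annotators tasks redudancy)

-- ===== LEMMAS AND PROOFS =====

-- (a % t + b) % t = (a + b) % t for Python's floor mod, any t (fmod a 0 = a).
theorem pv_modmod (a b t : Int) :
    PySem.Int.mod (PySem.Int.mod a t + b) t = PySem.Int.mod (a + b) t := by
  have h : PySem.Int.mod a t + b = (a + b) + t * (-(Int.fdiv a t)) := by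
    simp only [PySem.Int.mod, Int.fmod_def]; ring
  simp only [PySem.Int.mod] at *
  rw [h, Int.add_mul_fmod_self_left]

-- congruence: equal residues stay equal after adding b
theorem pv_cong (a a' b t : Int) (h : PySem.Int.mod a t = PySem.Int.mod a' t) :
    PySem.Int.mod (a + b) t = PySem.Int.mod (a' + b) t := by
  rw [← pv_modmod a b t, h, pv_modmod]

-- triangular-number step: T(j) = T(j-1) + j
theorem pv_tri (j : Int) :
    PySem.Int.floordiv (j * (j + 1)) 2 = PySem.Int.floordiv ((j - 1) * j) 2 + j := by
  have h2 : (0:Int) < 2 := by norm_num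
  rw [PySem.Int.floordiv_eq_ediv_of_pos h2, PySem.Int.floordiv_eq_ediv_of_pos h2]
  have h : j * (j + 1) = (j - 1) * j + j * 2 := by ring
  rw [h, Int.add_mul_ediv_right _ _ (by norm_num : (2:Int) ≠ 0)]

-- A's inner loop telescopes: row is the triangular closed form, carry is the last id
theorem pv_inner (t c : Int) (m : Nat) :
    (PySem.List.pyRange 0 (m : Int) 1).foldl
      (fun (p : List Int × Int) k =>
        (p.1 ++ [PySem.Int.mod (p.2 + k) t], PySem.Int.mod (p.2 + k) t)) ([], c)
    = ((PySem.List.pyRange 0 (m : Int) 1).map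
        (fun k => PySem.Int.mod (c + PySem.Int.floordiv (k * (k + 1)) 2) t),
       if m = 0 then c
       else PySem.Int.mod (c + PySem.Int.floordiv (((m : Int) - 1) * (m : Int)) 2) t) := by
  induction m with
  | zero => simp [PySem.List.pyRange_one_eq_nil (by norm_num : (0:Int) ≤ 0)]
  | succ m ih =>
    have hcast : ((m + 1 : Nat) : Int) = (m : Int) + 1 := by push_cast; ring
    rw [hcast, PySem.List.pyRange_one_succ_right (by positivity : (0:Int) ≤ (m:Int)),
        List.foldl_append, List.map_append, ih]
    simp only [List.foldl_cons, List.foldl_nil, List.map_cons, List.map_nil]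
    rcases Nat.eq_zero_or_pos m with hm | hm
    · subst hm
      norm_num [PySem.Int.floordiv]
    · have hm0 : m ≠ 0 := Nat.pos_iff_ne_zero.mp hm
      simp only [if_neg hm0]
      rw [pv_modmod, add_assoc, ← pv_tri]
      norm_num

-- inner loop for a positive Int bound
theorem pv_inner' (t c n : Int) (hn : 0 < n) :
    (PySem.List.pyRange 0 n 1).foldl
      (fun (p : List Int × Int) k =>
        (p.1 ++ [PySem.Int.mod (p.2 + k) t], PySem.Int.mod (p.2 + k) t)) ([], c)
    = ((PySem.List.pyRange 0 n 1).map
        (fun k => PySem.Int.mod (c + PySem.Int.floordiv (k * (k + 1)) 2) t),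
       PySem.Int.mod (c + PySem.Int.floordiv ((n - 1) * n) 2) t) := by
  have hcast : n = ((n.toNat : Nat) : Int) := by omega
  have hne : n.toNat ≠ 0 := by omega
  rw [hcast, pv_inner, if_neg hne]

-- outer loop, positive row length: A's fold carries c ≡ m*step and produces B's rows
theorem pv_outer_pos (t n : Int) (hn : 0 < n) (m : Nat) :
    ∃ c,
      (PySem.List.pyRange 0 (m : Int) 1).foldl
        (fun (st : List (List Int) × Int) _ =>
          let inner := (PySem.List.pyRange 0 n 1).foldl
            (fun (p : List Int × Int) k =>
              (p.1 ++ [PySem.Int.mod (p.2 + k) t], PySem.Int.mod (p.2 + k) t))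
            ([], st.2)
          (st.1 ++ [inner.1], inner.2 + 1))
        ([], 0)
      = ((PySem.List.pyRange 0 (m : Int) 1).map (fun r =>
          (PySem.List.pyRange 0 n 1).map (fun k =>
            PySem.Int.mod (r * (PySem.Int.floordiv ((n - 1) * n) 2 + 1)
              + PySem.Int.floordiv (k * (k + 1)) 2) t)), c)
      ∧ PySem.Int.mod c t
        = PySem.Int.mod ((m : Int) * (PySem.Int.floordiv ((n - 1) * n) 2 + 1)) t := by
  induction m with
  | zero =>
    exact ⟨0, by simp [PySem.List.pyRange_one_eq_nil (by norm_num : (0:Int) ≤ 0)], by norm_num⟩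
  | succ m ih =>
    obtain ⟨c, hfold, hc⟩ := ih
    set T := PySem.Int.floordiv ((n - 1) * n) 2 with hT
    have hcast : ((m + 1 : Nat) : Int) = (m : Int) + 1 := by push_cast; ring
    refine ⟨PySem.Int.mod (c + T) t + 1, ?_, ?_⟩
    · rw [hcast, PySem.List.pyRange_one_succ_right (by positivity : (0:Int) ≤ (m:Int)),
          List.foldl_append, List.map_append, hfold]
      simp only [List.foldl_cons, List.foldl_nil, List.map_cons, List.map_nil]
      rw [pv_inner' t c n hn]
      have hrow : (PySem.List.pyRange 0 n 1).map
            (fun k => PySem.Int.mod (c + PySem.Int.floordiv (k * (k + 1)) 2) t)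
          = (PySem.List.pyRange 0 n 1).map
            (fun k => PySem.Int.mod ((m : Int) * (T + 1) + PySem.Int.floordiv (k * (k + 1)) 2) t) := by
        refine List.map_congr_left (fun k _ => ?_)
        exact pv_cong c ((m : Int) * (T + 1)) _ t hc
      rw [hrow]
    · have h1 : PySem.Int.mod (PySem.Int.mod (c + T) t + 1) t
          = PySem.Int.mod (c + (T + 1)) t := by
        rw [pv_modmod]; ring_nf
      calc PySem.Int.mod (PySem.Int.mod (c + T) t + 1) t
          = PySem.Int.mod (c + (T + 1)) t := h1
        _ = PySem.Int.mod ((m : Int) * (T + 1) + (T + 1)) t := pv_cong c _ _ t hc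
        _ = PySem.Int.mod (((m : Nat) + 1 : Int) * (T + 1)) t := by ring_nf
        _ = PySem.Int.mod (((m + 1 : Nat) : Int) * (T + 1)) t := by push_cast; ring_nf

-- outer loop, non-positive row length: every row is empty on both sides
theorem pv_outer_zero (t n step : Int) (hn : n ≤ 0) (m : Nat) :
    ∃ c,
      (PySem.List.pyRange 0 (m : Int) 1).foldl
        (fun (st : List (List Int) × Int) _ =>
          let inner := (PySem.List.pyRange 0 n 1).foldl
            (fun (p : List Int × Int) k =>
              (p.1 ++ [PySem.Int.mod (p.2 + k) t], PySem.Int.mod (p.2 + k) t))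
            ([], st.2)
          (st.1 ++ [inner.1], inner.2 + 1))
        ([], 0)
      = ((PySem.List.pyRange 0 (m : Int) 1).map (fun r =>
          (PySem.List.pyRange 0 n 1).map (fun k =>
            PySem.Int.mod (r * step + PySem.Int.floordiv (k * (k + 1)) 2) t)), c) := by
  have hnil : PySem.List.pyRange 0 n 1 = [] := PySem.List.pyRange_one_eq_nil hn
  induction m with
  | zero =>
    exact ⟨0, by simp [PySem.List.pyRange_one_eq_nil (by norm_num : (0:Int) ≤ 0)]⟩
  | succ m ih =>
    obtain ⟨c, hfold⟩ := ih
    have hcast : ((m + 1 : Nat) : Int) = (m : Int) + 1 := by push_cast; ring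
    refine ⟨c + 1, ?_⟩
    rw [hcast, PySem.List.pyRange_one_succ_right (by positivity : (0:Int) ≤ (m:Int)),
        List.foldl_append, List.map_append, hfold]
    simp [hnil]

theorem create_uniform_task_map_py_eq (annotators tasks redudancy : Int) :
    create_uniform_task_map_py annotators tasks redudancy
    = create_uniform_task_map_py_alt annotators tasks redudancy := by
  unfold create_uniform_task_map_py create_uniform_task_map_py_alt
  by_cases h : annotators = 0 ∨ 0 < PySem.Int.mod (tasks * redudancy) annotators
  · simp only [if_pos h]
  · simp only [if_neg h]
    set n := PySem.Int.floordiv (tasks * redudancy) annotators with hn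
    rcases le_or_gt annotators 0 with ha | ha
    · rw [PySem.List.pyRange_one_eq_nil ha]
      simp
    · have hcast : annotators = ((annotators.toNat : Nat) : Int) := by omega
      rw [hcast]
      rcases le_or_gt n 0 with hle | hpos
      · obtain ⟨c, hfold⟩ := pv_outer_zero tasks n (PySem.Int.floordiv ((n - 1) * n) 2 + 1) hle annotators.toNat
        simp only [hfold]
      · obtain ⟨c, hfold, _⟩ := pv_outer_pos tasks n hpos annotators.toNat
        simp only [hfold]

-- ===== VERDICT (by name: the statement is the Claim_ definition above) =====
theorem create_uniform_task_map_py_spec : Claim_equal_create_uniform_task_map_py := by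
  intro annotators tasks redudancy _
  exact create_uniform_task_map_py_eq annotators tasks redudancy
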